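-- pv_equiv track=rewrite | github.com/YZ1981-GT/GT_plan | backend/tests/test_template_library_properties.py | _is_template_hidden_by_only_with_data
-- ===== SOURCE A (Python) =====
-- def _is_template_hidden_by_only_with_data(
--     template: dict,
--     accounts_with_data: set[str],
--     balance_loaded: bool,
--     only_with_data: bool,
-- ) -> bool:
--     """复刻 WorkpaperWorkbench.vue treeData 过滤逻辑：
--     只有在 (a) only_with_data 开启 + (b) balance_loaded + (c) linked_accounts 非空
--     + (d) 全部 linked_accounts 都没有数据（也无前缀匹配）时才隐藏。
--     无 linked_accounts 的模板永远不被该过滤器隐藏。"""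
--     if not only_with_data or not balance_loaded:
--         return False
--     linked = template.get("linked_accounts") or []
--     if not linked:
--         return False
--     has_data = any(
--         c and (
--             c in accounts_with_data
--             or any(
--                 existing.startswith(c) or c.startswith(existing)
--                 for existing in accounts_with_data
--             )
--         )
--         for c in linked
--     )
--     return not has_data
-- ===== SOURCE B (Python) =====
-- def _is_template_hidden_by_only_with_data(
--     template: dict,
--     accounts_with_data: set[str],
--     balance_loaded: bool,
--     only_with_data: bool,
-- ) -> bool:
--     if not (only_with_data and balance_loaded):
--         return False
--     linked = template.get("linked_accounts") or []
--     if not linked: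
--         return False
--     # Precompute every prefix of every account once: "some account starts with c"
--     # becomes a single set lookup, and "c starts with some account" becomes
--     # len(c) set lookups, instead of an inner scan over all accounts per code.
--     prefixes = set()
--     for e in accounts_with_data:
--         for i in range(len(e) + 1):
--             prefixes.add(e[:i])
--     for c in linked:
--         if c and (c in prefixes
--                   or any(c[:i] in accounts_with_data for i in range(len(c)))):
--             return False
--     return True
-- ===== Notes on version B (the rewrite author's own statement) =====
-- stated objective: alternative
-- what changed: B precomputes the set of all prefixes of the accounts once and decides each linked code by set lookups on its own prefixes, instead of A's inner scan over every account per code.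
import Mathlib
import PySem

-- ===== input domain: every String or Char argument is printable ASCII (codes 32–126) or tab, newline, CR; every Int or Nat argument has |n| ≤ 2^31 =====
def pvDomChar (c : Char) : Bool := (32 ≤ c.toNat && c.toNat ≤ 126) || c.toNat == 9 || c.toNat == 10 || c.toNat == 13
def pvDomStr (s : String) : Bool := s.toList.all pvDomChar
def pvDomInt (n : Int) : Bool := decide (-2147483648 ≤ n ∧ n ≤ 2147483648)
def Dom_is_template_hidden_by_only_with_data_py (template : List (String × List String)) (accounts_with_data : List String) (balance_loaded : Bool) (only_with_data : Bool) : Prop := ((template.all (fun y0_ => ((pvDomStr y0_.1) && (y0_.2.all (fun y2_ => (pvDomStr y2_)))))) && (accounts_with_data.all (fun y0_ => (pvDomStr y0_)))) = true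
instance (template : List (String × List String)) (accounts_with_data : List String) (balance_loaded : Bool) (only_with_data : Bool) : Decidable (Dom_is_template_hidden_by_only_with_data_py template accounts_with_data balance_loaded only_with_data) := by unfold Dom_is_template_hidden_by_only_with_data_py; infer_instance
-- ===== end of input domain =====

-- B precomputes the set of all prefixes of the accounts once and decides each linked code by set lookups, instead of A's inner scan over all accounts per code (objective: alternative).
-- ===== PORT A =====
def is_template_hidden_by_only_with_data_py (template : List (String × List String)) (accounts_with_data : List String) (balance_loaded : Bool) (only_with_data : Bool) : Bool :=
  if !only_with_data || !balance_loaded then false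
  else
    let linked : List String :=
      match PySem.Dict.get? ⟨template⟩ "linked_accounts" with
      | some v => if v == ([] : List String) then [] else v
      | none => []
    if linked == ([] : List String) then false
    else
      let has_data := linked.any (fun c =>
        !(c == "") && (accounts_with_data.contains c ||
          accounts_with_data.any (fun existing =>
            PySem.Str.startswith existing c || PySem.Str.startswith c existing)))
      !has_data

-- ===== PORT B =====
-- for e in accounts: for i in range(len(e)+1): prefixes.add(e[:i])
def pvPrefixes (accounts_with_data : List String) : PySem.Set String :=
  accounts_with_data.foldl (fun s e =>
    (PySem.List.pyRange 0 (PySem.Str.len e + 1) 1).foldl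
      (fun s i => PySem.Set.add s (PySem.Str.slice e none (some i))) s)
    PySem.Set.empty

-- for c in linked: if c and (...): return False / return True
def pvLoopB (accounts_with_data : List String) (prefixes : PySem.Set String) : List String → Bool
  | [] => true
  | c :: rest =>
    if !(c == "") && (PySem.Set.contains prefixes c ||
        (PySem.List.pyRange 0 (PySem.Str.len c) 1).any
          (fun i => accounts_with_data.contains (PySem.Str.slice c none (some i))))
    then false
    else pvLoopB accounts_with_data prefixes rest

def is_template_hidden_by_only_with_data_py_alt (template : List (String × List String)) (accounts_with_data : List String) (balance_loaded : Bool) (only_with_data : Bool) : Bool :=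
  if !(only_with_data && balance_loaded) then false
  else
    let linked : List String :=
      match PySem.Dict.get? ⟨template⟩ "linked_accounts" with
      | some v => if v == ([] : List String) then [] else v
      | none => []
    if linked == ([] : List String) then false
    else pvLoopB accounts_with_data (pvPrefixes accounts_with_data) linked

-- ===== PRECONDITION & SPEC =====
def Spec_is_template_hidden_by_only_with_data_py (template : List (String × List String)) (accounts_with_data : List String) (balance_loaded : Bool) (only_with_data : Bool) (out : Bool) : Prop := out = is_template_hidden_by_only_with_data_py_alt template accounts_with_data balance_loaded only_with_data
instance (template : List (String × List String)) (accounts_with_data : List String) (balance_loaded : Bool) (only_with_data : Bool) (out : Bool) : Decidable (Spec_is_template_hidden_by_only_with_data_py template accounts_with_data balance_loaded only_with_data out) := by unfold Spec_is_template_hidden_by_only_with_data_py; infer_instance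

-- ===== CLAIM (what is proved, stated in full; the proofs are below) =====
def Claim_equal_is_template_hidden_by_only_with_data_py : Prop := ∀ (template : List (String × List String)) (accounts_with_data : List String) (balance_loaded : Bool) (only_with_data : Bool), Dom_is_template_hidden_by_only_with_data_py template accounts_with_data balance_loaded only_with_data → Spec_is_template_hidden_by_only_with_data_py template accounts_with_data balance_loaded only_with_data (is_template_hidden_by_only_with_data_py template accounts_with_data balance_loaded only_with_data)

-- ===== LEMMAS AND PROOFS =====

lemma pv_set_contains (s : PySem.Set String) (x : String) :
    PySem.Set.contains s x = true ↔ x ∈ s := by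
  simp [PySem.Set.contains]

lemma pv_len_eq (s : String) : PySem.Str.len s = (s.toList.length : Int) := by
  simp [PySem.Str.len]

lemma pv_slice_take (e : String) (i : Int) (h : 0 ≤ i) :
    (PySem.Str.slice e none (some i)).toList = e.toList.take i.toNat := by
  rw [PySem.Str.toList_slice, PySem.Chars.slice_eq_listSlice, PySem.List.slice_to _ h]

lemma pv_mem_foldl_add {β : Type} (g : β → String) (l : List β) (s : PySem.Set String) (x : String) :
    x ∈ l.foldl (fun s b => PySem.Set.add s (g b)) s ↔ x ∈ s ∨ ∃ b ∈ l, x = g b := by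
  induction l generalizing s with
  | nil => simp
  | cons b t ih =>
    rw [List.foldl_cons, ih]
    rw [PySem.Set.mem_add]
    constructor
    · rintro (⟨h | h⟩ | h)
      · exact Or.inl h
      · exact Or.inr ⟨b, by simp, h⟩
      · rcases h with ⟨b', hb', h⟩
        exact Or.inr ⟨b', by simp [hb'], h⟩
    · rintro (h | ⟨b', hb', h⟩)
      · exact Or.inl (Or.inl h)
      · rcases List.mem_cons.mp hb' with rfl | hb'
        · exact Or.inl (Or.inr h)
        · exact Or.inr ⟨b', hb', h⟩

lemma pv_mem_prefixes_aux (acc : List String) (s : PySem.Set String) (x : String) :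
    x ∈ acc.foldl (fun s e => (PySem.List.pyRange 0 (PySem.Str.len e + 1) 1).foldl
      (fun s i => PySem.Set.add s (PySem.Str.slice e none (some i))) s) s
    ↔ x ∈ s ∨ ∃ e ∈ acc, x.toList <+: e.toList := by
  induction acc generalizing s with
  | nil => simp
  | cons e t ih =>
    rw [List.foldl_cons, ih]
    have h1 : x ∈ (PySem.List.pyRange 0 (PySem.Str.len e + 1) 1).foldl
        (fun s i => PySem.Set.add s (PySem.Str.slice e none (some i))) s
        ↔ x ∈ s ∨ x.toList <+: e.toList := by
      rw [pv_mem_foldl_add]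
      constructor
      · rintro (h | ⟨i, hi, rfl⟩)
        · exact Or.inl h
        · right
          rw [PySem.List.mem_pyRange_one] at hi
          rw [pv_slice_take e i hi.1]
          exact List.take_prefix _ _
      · rintro (h | hp)
        · exact Or.inl h
        · right
          refine ⟨(x.toList.length : Int), ?_, ?_⟩
          · rw [PySem.List.mem_pyRange_one]
            have := hp.length_le
            rw [pv_len_eq]
            omega
          · rw [← String.toList_inj, pv_slice_take _ _ (by positivity), Int.toNat_natCast]
            exact List.prefix_iff_eq_take.mp hp
    rw [h1]
    constructor
    · rintro ((h | h) | h)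
      · exact Or.inl h
      · exact Or.inr ⟨e, by simp, h⟩
      · rcases h with ⟨e', he', h⟩
        exact Or.inr ⟨e', by simp [he'], h⟩
    · rintro (h | ⟨e', he', h⟩)
      · exact Or.inl (Or.inl h)
      · rcases List.mem_cons.mp he' with rfl | he'
        · exact Or.inl (Or.inr h)
        · exact Or.inr ⟨e', he', h⟩

lemma pv_mem_prefixes (acc : List String) (x : String) :
    x ∈ pvPrefixes acc ↔ ∃ e ∈ acc, x.toList <+: e.toList := by
  rw [pvPrefixes, pv_mem_prefixes_aux]
  simp [PySem.Set.empty]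

lemma pv_match_eq (acc : List String) (c : String) :
    (PySem.Set.contains (pvPrefixes acc) c ||
        (PySem.List.pyRange 0 (PySem.Str.len c) 1).any
          (fun i => acc.contains (PySem.Str.slice c none (some i))))
    = (acc.contains c ||
        acc.any (fun e => PySem.Str.startswith e c || PySem.Str.startswith c e)) := by
  rw [Bool.eq_iff_iff]
  simp only [Bool.or_eq_true, List.any_eq_true, List.contains_iff_mem,
    pv_set_contains, PySem.Str.startswith_eq, PySem.Chars.startswith_iff,
    PySem.List.mem_pyRange_one, pv_mem_prefixes]
  constructor
  · rintro (⟨e, he, hp⟩ | ⟨i, ⟨h0, hlt⟩, hmem⟩)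
    · exact Or.inr ⟨e, he, Or.inl hp⟩
    · refine Or.inr ⟨_, hmem, Or.inr ?_⟩
      rw [pv_slice_take _ _ h0]
      exact List.take_prefix _ _
  · rintro (hc | ⟨e, he, hp | hp⟩)
    · exact Or.inl ⟨c, hc, List.prefix_refl _⟩
    · exact Or.inl ⟨e, he, hp⟩
    · by_cases hlen : c.toList.length ≤ e.toList.length
      · have : e.toList = c.toList := hp.eq_of_length_le hlen
        have : e = c := String.toList_inj.mp this
        subst this
        exact Or.inl ⟨e, he, List.prefix_refl _⟩
      · refine Or.inr ⟨(e.toList.length : Int), ⟨by positivity, ?_⟩, ?_⟩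
        · rw [pv_len_eq]; omega
        · have hs : PySem.Str.slice c none (some (e.toList.length : Int)) = e := by
            rw [← String.toList_inj, pv_slice_take _ _ (by positivity), Int.toNat_natCast]
            exact (List.prefix_iff_eq_take.mp hp).symm
          rw [hs]; exact he

lemma pv_ite_bool (p r : Bool) : (if p then false else !r) = !(p || r) := by
  cases p <;> simp

lemma pv_loop_eq (acc : List String) (linked : List String) :
    pvLoopB acc (pvPrefixes acc) linked
    = !(linked.any (fun c => !(c == "") && (acc.contains c ||
        acc.any (fun e => PySem.Str.startswith e c || PySem.Str.startswith c e)))) := by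
  induction linked with
  | nil => rfl
  | cons c rest ih =>
    rw [pvLoopB, pv_match_eq acc c, ih, List.any_cons, Bool.not_or]
    exact pv_ite_bool _ _ |>.trans (by rw [Bool.not_or])

-- ===== VERDICT (by name: the statement is the Claim_ definition above) =====
theorem is_template_hidden_by_only_with_data_py_spec : Claim_equal_is_template_hidden_by_only_with_data_py := by
  intro template accounts_with_data balance_loaded only_with_data _
  unfold Spec_is_template_hidden_by_only_with_data_py
  unfold is_template_hidden_by_only_with_data_py is_template_hidden_by_only_with_data_py_alt
  cases only_with_data <;> cases balance_loaded <;>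
    simp only [Bool.not_true, Bool.not_false, Bool.or_true, Bool.or_false,
      Bool.and_self, Bool.and_true, if_true] <;> try rfl
  rw [pv_loop_eq accounts_with_data]
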